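-- pv_equiv track=rewrite | github.com/ICB-DCM/FiguresMoSeS | Fig4_Blasi/simulations/blasi_helpers.py | block_of_ones
-- ===== SOURCE A (Python) =====
-- def block_of_ones(array: list, i: int) -> bool:
--     """ checks if array contains a block of i times 1 and no other 1 i.e. array = 0^* + 1^i + 0^* """
--     first_one = False
--     second_zero = False
--
--     if array.count(1) != i:
--         # block of i times 1 is impossible
--         return False
--
--     for index in range(len(array)):
--         # go through array and check if all ones occur consecutively
--         if array[index] and first_one is False:
--             # first time 1
--             first_one = True
--         elif array[index] and first_one is True and second_zero is False:
--             # in first block of ones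
--             first_one = True
--         elif array[index] and first_one is True and second_zero is True:
--             # array includes 0^* + 1^+ + 0^+ + 1^+ -> no blck of i times 1 possible
--             return False
--         elif not array[index] and first_one is True:
--             second_zero = True
--
--     return True
-- ===== SOURCE B (Python) =====
-- def block_of_ones(array: list, i: int) -> bool:
--     """ checks if array contains a block of i times 1 and no other 1 i.e. array = 0^* + 1^i + 0^* """
--     if array.count(1) != i:
--         return False
--     pos = [k for k, v in enumerate(array) if v]
--     return not pos or pos[-1] - pos[0] + 1 == len(pos)
-- ===== Notes on version B (the rewrite author's own statement) =====
-- stated objective: simpler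
-- what changed: Replaces the stateful forward scan (first_one/second_zero flags with early exit) by collecting the indices of truthy elements and checking that they span a contiguous range (last - first + 1 == count).
import Mathlib
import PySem

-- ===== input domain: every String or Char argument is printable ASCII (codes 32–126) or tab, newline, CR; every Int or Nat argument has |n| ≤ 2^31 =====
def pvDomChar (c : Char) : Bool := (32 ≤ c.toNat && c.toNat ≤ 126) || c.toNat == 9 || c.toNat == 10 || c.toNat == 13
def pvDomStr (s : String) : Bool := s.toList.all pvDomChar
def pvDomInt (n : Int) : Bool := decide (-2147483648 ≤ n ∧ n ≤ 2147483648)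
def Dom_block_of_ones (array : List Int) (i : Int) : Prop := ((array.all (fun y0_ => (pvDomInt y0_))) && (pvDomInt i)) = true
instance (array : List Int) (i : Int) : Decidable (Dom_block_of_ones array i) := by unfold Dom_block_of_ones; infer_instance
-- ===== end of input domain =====

-- B replaces A's stateful flag scan by collecting the truthy indices and checking they span a
-- contiguous range; equal return value on all inputs (objective: simpler, no speed claim).

-- ===== PORT A =====
-- the for-loop over range(len(array)) with state (first_one, second_zero) and early return,
-- branches in the original order
def blockLoopA : List Int → Bool → Bool → Bool
  | [], _, _ => true
  | x :: xs, firstOne, secondZero =>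
    if (x != 0) && (firstOne == false) then blockLoopA xs true secondZero
    else if (x != 0) && (firstOne == true) && (secondZero == false) then blockLoopA xs true secondZero
    else if (x != 0) && (firstOne == true) && (secondZero == true) then false
    else if (x == 0) && (firstOne == true) then blockLoopA xs firstOne true
    else blockLoopA xs firstOne secondZero

def block_of_ones (array : List Int) (i : Int) : Bool :=
  if ((PySem.List.count array 1 : Int) ≠ i) then false
  else blockLoopA array false false

-- ===== PORT B =====
def block_of_ones_alt (array : List Int) (i : Int) : Bool :=
  if ((PySem.List.count array 1 : Int) ≠ i) then false
  else
    let pos := ((PySem.List.enumerate array 0).filter (fun p => p.2 != 0)).map (fun p => p.1)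
    pos.isEmpty || decide (pos.getLastD 0 - pos.headD 0 + 1 = (pos.length : Int))

-- ===== PRECONDITION & SPEC =====
def Spec_block_of_ones (array : List Int) (i : Int) (out : Bool) : Prop := out = block_of_ones_alt array i
instance (array : List Int) (i : Int) (out : Bool) : Decidable (Spec_block_of_ones array i out) := by unfold Spec_block_of_ones; infer_instance

-- ===== CLAIM (what is proved, stated in full; the proofs are below) =====
def Claim_equal_block_of_ones : Prop := ∀ (array : List Int) (i : Int), Dom_block_of_ones array i → Spec_block_of_ones array i (block_of_ones array i)

-- ===== LEMMAS AND PROOFS =====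

-- the list of truthy indices of xs when enumeration starts at n
def posL (n : Int) (xs : List Int) : List Int :=
  ((PySem.List.enumerate xs n).filter (fun p => p.2 != 0)).map (fun p => p.1)

theorem posL_nil (n : Int) : posL n [] = [] := rfl

theorem posL_cons (n : Int) (x : Int) (xs : List Int) :
    posL n (x :: xs) = if x ≠ 0 then n :: posL (n+1) xs else posL (n+1) xs := by
  simp only [posL, PySem.List.enumerate_cons, List.filter_cons]
  by_cases hx : x = 0 <;> simp [hx]

-- lower bound on the last collected index
theorem posL_last_ge (xs : List Int) : ∀ n : Int, posL n xs ≠ [] →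
    n + ((posL n xs).length : Int) - 1 ≤ (posL n xs).getLastD 0 := by
  induction xs with
  | nil => intro n h; simp [posL_nil] at h
  | cons x xs ih =>
    intro n
    by_cases hx : x = 0
    · rw [posL_cons, if_neg (by simp [hx])]
      intro h; have := ih (n+1) h; omega
    · rw [posL_cons, if_pos hx]
      intro _
      rcases hp : posL (n+1) xs with _ | ⟨y, ys⟩
      · simp
      · have hb := ih (n+1) (by rw [hp]; simp)
        rw [hp] at hb
        simp only [List.getLastD_cons, List.length_cons] at hb ⊢
        push_cast at hb ⊢
        omega

-- state (true, true): the loop survives iff no further truthy element occurs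
theorem loopA_tt (xs : List Int) : ∀ n : Int,
    blockLoopA xs true true = (posL n xs).isEmpty := by
  induction xs with
  | nil => intro n; simp [blockLoopA, posL_nil]
  | cons x xs ih =>
    intro n
    by_cases hx : x = 0 <;>
      simp [blockLoopA, posL_cons, hx, ih (n+1)]

-- state (true, false): a truthy element was just seen at index n - 1; the loop survives iff the
-- remaining truthy indices continue that block consecutively
theorem loopA_tf (xs : List Int) : ∀ n : Int,
    blockLoopA xs true false =
      ((posL n xs).isEmpty || decide ((posL n xs).getLastD 0 + 1 = n + ((posL n xs).length : Int))) := by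
  induction xs with
  | nil => intro n; simp [blockLoopA, posL_nil]
  | cons x xs ih =>
    intro n
    by_cases hx : x = 0
    · rw [posL_cons, if_neg (by simp [hx])]
      have h1 : blockLoopA (x :: xs) true false = blockLoopA xs true true := by
        simp [blockLoopA, hx]
      rw [h1, loopA_tt xs (n+1)]
      rcases hp : posL (n+1) xs with _ | ⟨y, ys⟩
      · simp
      · have hb := posL_last_ge xs (n+1) (by rw [hp]; simp)
        rw [hp] at hb
        simp only [List.isEmpty_cons, Bool.false_or, List.length_cons,
          List.getLastD_eq_getLast?] at hb ⊢
        have : ¬ ((y :: ys).getLast?.getD 0 + 1 = n + (((ys.length + 1 : Nat)) : Int)) := by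
          push_cast at hb ⊢
          omega
        simp only [this, decide_false]
    · rw [posL_cons, if_pos hx]
      have h1 : blockLoopA (x :: xs) true false = blockLoopA xs true false := by
        simp [blockLoopA, hx]
      rw [h1, ih (n+1)]
      rcases hp : posL (n+1) xs with _ | ⟨y, ys⟩
      · simp
      · simp only [List.isEmpty_cons, Bool.false_or, List.getLastD_cons, List.length_cons,
          decide_eq_decide]
        push_cast
        omega

-- state (false, false): the loop survives iff the truthy indices span a contiguous range
theorem loopA_ff (xs : List Int) : ∀ n : Int,
    blockLoopA xs false false =
      ((posL n xs).isEmpty ||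
        decide ((posL n xs).getLastD 0 - (posL n xs).headD 0 + 1 = ((posL n xs).length : Int))) := by
  induction xs with
  | nil => intro n; simp [blockLoopA, posL_nil]
  | cons x xs ih =>
    intro n
    by_cases hx : x = 0
    · rw [posL_cons, if_neg (by simp [hx])]
      have h1 : blockLoopA (x :: xs) false false = blockLoopA xs false false := by
        simp [blockLoopA, hx]
      rw [h1, ih (n+1)]
    · rw [posL_cons, if_pos hx]
      have h1 : blockLoopA (x :: xs) false false = blockLoopA xs true false := by
        simp [blockLoopA, hx]
      rw [h1, loopA_tf xs (n+1)]
      rcases hp : posL (n+1) xs with _ | ⟨y, ys⟩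
      · simp
      · simp only [List.isEmpty_cons, Bool.false_or, List.getLastD_cons, List.headD_cons,
          List.length_cons, decide_eq_decide]
        push_cast
        omega

-- ===== VERDICT (by name: the statement is the Claim_ definition above) =====
theorem block_of_ones_spec : Claim_equal_block_of_ones := by
  intro array i _
  unfold Spec_block_of_ones block_of_ones block_of_ones_alt
  by_cases hc : ((PySem.List.count array 1 : Int) ≠ i)
  · rw [if_pos hc, if_pos hc]
  · rw [if_neg hc, if_neg hc]
    exact loopA_ff array 0
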